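-- pv_equiv track=rewrite | github.com/Truncheon-eng/server_side_template_injection | app/main.py | validation
-- ===== SOURCE A (Python) =====
-- def validation(input_string):
--     black_list = ['{{','}}', 'builtins','eval','import','class', 'subclasses', '__', 'init']
--     for i in range(len(black_list)):
--         if black_list[i] in input_string:
--             input_string = input_string.replace(black_list[i],'')
--     bool_vector = [bool(word in input_string) for word in black_list]
--     if any(bool_vector):
--         input_string = validation(input_string)
--     return input_string
-- ===== SOURCE B (Python) =====
-- def validation(input_string):
--     black_list = ['{{','}}', 'builtins','eval','import','class', 'subclasses', '__', 'init']
--     s = input_string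
--     while True:
--         t = s
--         for w in black_list:
--             t = t.replace(w, '')
--         if t == s:
--             return s
--         s = t
-- ===== Notes on version B (the rewrite author's own statement) =====
-- stated objective: idiomatic
-- what changed: A's recursive fixed-point (strip each blacklisted word if present, recompute a membership vector, recurse while any word remains) becomes an iterative while-loop that unconditionally strips all words each pass and stops when the string no longer changes (fixpoint test instead of a membership re-scan and recursion).
import Mathlib
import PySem

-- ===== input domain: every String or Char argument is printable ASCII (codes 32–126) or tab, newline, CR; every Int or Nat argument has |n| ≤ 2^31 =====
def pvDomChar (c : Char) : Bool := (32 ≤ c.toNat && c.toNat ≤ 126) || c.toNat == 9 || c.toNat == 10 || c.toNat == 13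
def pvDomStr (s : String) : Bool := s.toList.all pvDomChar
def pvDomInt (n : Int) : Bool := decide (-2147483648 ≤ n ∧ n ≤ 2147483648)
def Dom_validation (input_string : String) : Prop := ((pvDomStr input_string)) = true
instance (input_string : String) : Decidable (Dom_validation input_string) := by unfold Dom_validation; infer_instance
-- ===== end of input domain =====

-- B replaces A's recursive fixed-point (re-strip and recurse while any blacklisted word remains)
-- with an iterative loop that re-strips until the string stops changing (objective: idiomatic).

-- ===== PORT A =====
-- helper lemmas about PySem.Chars.replace/ the stripping pass: the ports' termination proofs cite them by name

theorem go_len_le (old : List Char) (fuel : Nat) (l acc : List Char) :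
    (PySem.Chars.replace.go old [] fuel l acc).length ≤ acc.length + l.length := by
  induction fuel generalizing l acc with
  | zero => simp [PySem.Chars.replace.go]
  | succ n ih =>
    cases l with
    | nil => simp [PySem.Chars.replace.go]
    | cons c t =>
      rw [PySem.Chars.replace.go]
      split
      · have := ih (List.drop old.length (c :: t)) ([].reverse ++ acc)
        simp only [List.length_drop, List.length_cons, List.length_reverse,
          List.length_nil, List.length_append, List.reverse_nil, List.nil_append] at this ⊢
        omega
      · have := ih t (c :: acc)
        simp only [List.length_cons] at this ⊢
        omega

theorem go_not_infix (old : List Char) (hold : old ≠ []) (fuel : Nat) :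
    ∀ (l acc : List Char), l.length ≤ fuel → ¬ old <:+: l →
      PySem.Chars.replace.go old [] fuel l acc = acc.reverse ++ l := by
  induction fuel with
  | zero =>
    intro l acc hf h
    have : l = [] := by cases l <;> simp_all
    subst this; simp [PySem.Chars.replace.go]
  | succ n ih =>
    intro l acc hf h
    cases l with
    | nil => simp [PySem.Chars.replace.go]
    | cons c t =>
      rw [PySem.Chars.replace.go]
      rw [List.infix_cons_iff] at h
      rw [not_or] at h
      have hp : old.isPrefixOf (c :: t) = false := by
        rw [Bool.eq_false_iff]
        intro hpp
        exact h.1 (List.isPrefixOf_iff_prefix.mp hpp)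
      rw [hp]
      simp only [Bool.false_eq_true, if_false]
      rw [ih t (c :: acc) (by simpa using Nat.lt_succ_iff.mp (by simpa using hf)) h.2]
      simp

theorem go_len_lt (old : List Char) (hold : old ≠ []) (fuel : Nat) :
    ∀ (l acc : List Char), l.length ≤ fuel → old <:+: l →
      (PySem.Chars.replace.go old [] fuel l acc).length < acc.length + l.length := by
  induction fuel with
  | zero =>
    intro l acc hf h
    have : l = [] := by cases l <;> simp_all
    subst this
    exact absurd (List.eq_nil_of_infix_nil h) hold
  | succ n ih =>
    intro l acc hf h
    cases l with
    | nil => exact absurd (List.eq_nil_of_infix_nil h) hold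
    | cons c t =>
      rw [PySem.Chars.replace.go]
      split
      · rename_i hp
        have h1 : 1 ≤ old.length := by cases old <;> simp_all
        have := go_len_le old n (List.drop old.length (c :: t)) ([].reverse ++ acc)
        simp only [List.length_drop, List.length_cons, List.length_reverse,
          List.length_nil, List.length_append, List.reverse_nil, List.nil_append] at this ⊢
        omega
      · rename_i hp
        have hnp : ¬ old <+: (c :: t) := by
          intro hpre
          exact hp (List.isPrefixOf_iff_prefix.mpr hpre)
        have ht : old <:+: t := by
          rcases (List.infix_cons_iff).mp h with h1 | h2
          · exact absurd h1 hnp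
          · exact h2
        have := ih t (c :: acc) (by simpa using Nat.lt_succ_iff.mp (by simpa using hf)) ht
        simp only [List.length_cons] at this ⊢
        omega

-- replace-level (new = [])
theorem replace_of_not_infix (old s : List Char) (hold : old ≠ []) (h : ¬ old <:+: s) :
    PySem.Chars.replace s old [] = s := by
  rw [PySem.Chars.replace]
  have : old.isEmpty = false := by cases old <;> simp_all
  rw [this]
  simp only [Bool.false_eq_true, if_false]
  simpa using go_not_infix old hold s.length s [] le_rfl h

theorem replace_len_le (old s : List Char) (hold : old ≠ []) :
    (PySem.Chars.replace s old []).length ≤ s.length := by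
  rw [PySem.Chars.replace]
  have : old.isEmpty = false := by cases old <;> simp_all
  rw [this]
  simp only [Bool.false_eq_true, if_false]
  simpa using go_len_le old s.length s []

theorem replace_len_lt (old s : List Char) (hold : old ≠ []) (h : old <:+: s) :
    (PySem.Chars.replace s old []).length < s.length := by
  rw [PySem.Chars.replace]
  have : old.isEmpty = false := by cases old <;> simp_all
  rw [this]
  simp only [Bool.false_eq_true, if_false]
  simpa using go_len_lt old hold s.length s [] le_rfl h

-- strip-level on lists of words
def stripWords (ws : List (List Char)) (s : List Char) : List Char :=
  ws.foldl (fun t w => PySem.Chars.replace t w []) s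

theorem stripWords_len_le (ws : List (List Char)) (hne : ∀ w ∈ ws, w ≠ []) (s : List Char) :
    (stripWords ws s).length ≤ s.length := by
  induction ws generalizing s with
  | nil => simp [stripWords]
  | cons w ws ih =>
    refine le_trans (ih (fun x hx => hne x (List.mem_cons_of_mem _ hx)) _) ?_
    exact replace_len_le w s (hne w (List.mem_cons_self))

theorem stripWords_eq_or_lt (ws : List (List Char)) (hne : ∀ w ∈ ws, w ≠ []) (s : List Char) :
    stripWords ws s = s ∨ (stripWords ws s).length < s.length := by
  induction ws generalizing s with
  | nil => left; simp [stripWords]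
  | cons w ws ih =>
    have hw : w ≠ [] := hne w List.mem_cons_self
    have hne' : ∀ x ∈ ws, x ≠ [] := fun x hx => hne x (List.mem_cons_of_mem _ hx)
    by_cases hin : w <:+: s
    · right
      have h1 : (PySem.Chars.replace s w []).length < s.length := replace_len_lt w s hw hin
      have h2 := stripWords_len_le ws hne' (PySem.Chars.replace s w [])
      show (stripWords ws (PySem.Chars.replace s w [])).length < s.length
      omega
    · have hstep : stripWords (w :: ws) s = stripWords ws s := by
        show stripWords ws (PySem.Chars.replace s w []) = _
        rw [replace_of_not_infix w s hw hin]
      rw [hstep]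
      exact ih hne' s

theorem stripWords_of_not_any (ws : List (List Char)) (hne : ∀ w ∈ ws, w ≠ []) (s : List Char)
    (h : ∀ w ∈ ws, ¬ w <:+: s) : stripWords ws s = s := by
  induction ws with
  | nil => simp [stripWords]
  | cons w ws ih =>
    show stripWords ws (PySem.Chars.replace s w []) = s
    rw [replace_of_not_infix w s (hne w List.mem_cons_self) (h w List.mem_cons_self)]
    exact ih (fun x hx => hne x (List.mem_cons_of_mem _ hx)) (fun x hx => h x (List.mem_cons_of_mem _ hx))

theorem stripWords_lt_of_mem (ws : List (List Char)) (hne : ∀ w ∈ ws, w ≠ []) (s : List Char)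
    (h : ∃ w ∈ ws, w <:+: s) : (stripWords ws s).length < s.length := by
  induction ws generalizing s with
  | nil => simp at h
  | cons v ws ih =>
    have hv : v ≠ [] := hne v List.mem_cons_self
    have hne' : ∀ x ∈ ws, x ≠ [] := fun x hx => hne x (List.mem_cons_of_mem _ hx)
    show (stripWords ws (PySem.Chars.replace s v [])).length < s.length
    by_cases hin : v <:+: s
    · have h1 := replace_len_lt v s hv hin
      have h2 := stripWords_len_le ws hne' (PySem.Chars.replace s v [])
      omega
    · rw [replace_of_not_infix v s hv hin]
      rcases h with ⟨w, hw, hws⟩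
      rcases List.mem_cons.mp hw with rfl | hw'
      · exact absurd hws hin
      · exact ih hne' s ⟨w, hw', hws⟩

def blackChars : List (List Char) :=
  [['{','{'],['}','}'],"builtins".toList,"eval".toList,"import".toList,"class".toList,"subclasses".toList,['_','_'],"init".toList]

theorem blackChars_ne : ∀ w ∈ blackChars, w ≠ [] := by decide

def blackListA : List String := ["{{","}}","builtins","eval","import","class","subclasses","__","init"]

theorem passA_toList (ws : List String) (s : String) :
    (ws.foldl (fun s w => if PySem.Str.isIn w s then PySem.Str.replace s w "" else s) s).toList
      = stripWords (ws.map String.toList) s.toList := by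
  induction ws generalizing s with
  | nil => simp [stripWords]
  | cons w ws ih =>
    show (ws.foldl _ (if PySem.Str.isIn w s then PySem.Str.replace s w "" else s)).toList
      = stripWords (ws.map String.toList) (PySem.Chars.replace s.toList w.toList [])
    by_cases hin : PySem.Str.isIn w s = true
    · rw [hin]
      simp only [if_true]
      rw [ih]
      simp [PySem.Str.toList_replace]
    · rw [Bool.eq_false_iff.mpr hin]
      simp only [Bool.false_eq_true, if_false]
      rw [ih]
      by_cases hw : w.toList = []
      · rw [hw, PySem.Chars.replace]
        simp
      · rw [replace_of_not_infix w.toList s.toList hw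
          (by rw [← PySem.Str.isIn_iff_infix]; exact fun hc => hin hc)]

theorem blackA_map : blackListA.map String.toList = blackChars := by decide

def validation (input_string : String) : String :=
  let s1 := blackListA.foldl
    (fun s w => if PySem.Str.isIn w s then PySem.Str.replace s w "" else s) input_string
  let boolVector := blackListA.map (fun w => PySem.Str.isIn w s1)
  if h : boolVector.any id then validation s1 else s1
termination_by input_string.toList.length
decreasing_by
  have h1 : s1.toList = stripWords blackChars input_string.toList := by
    rw [show s1 = blackListA.foldl (fun s w => if PySem.Str.isIn w s then PySem.Str.replace s w "" else s) input_string from rfl,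
      passA_toList, blackA_map]
  have h2 : ∃ w ∈ blackChars, w <:+: s1.toList := by
    simp only [boolVector, List.any_map, List.any_eq_true, Function.comp, id] at h
    rcases h with ⟨w, hw, hin⟩
    exact ⟨w.toList, by rw [← blackA_map]; exact List.mem_map_of_mem hw,
      (PySem.Str.isIn_iff_infix w s1).mp hin⟩
  have h3 : ∃ w ∈ blackChars, w <:+: input_string.toList := by
    rcases h2 with ⟨w, hw, hin⟩
    by_cases hall : ∀ w ∈ blackChars, ¬ w <:+: input_string.toList
    · exfalso
      rw [h1, stripWords_of_not_any blackChars blackChars_ne _ hall] at hin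
      exact hall w hw hin
    · push_neg at hall
      rcases hall with ⟨v, hv, hvin⟩
      exact ⟨v, hv, hvin⟩
  have := stripWords_lt_of_mem blackChars blackChars_ne input_string.toList h3
  rw [← h1] at this
  exact this


-- ===== PORT B =====
def blackListB : List String := ["{{","}}","builtins","eval","import","class","subclasses","__","init"]

def stripAll (s : String) : String :=
  blackListB.foldl (fun t w => PySem.Str.replace t w "") s

theorem blackB_map : blackListB.map String.toList = blackChars := by decide

theorem foldl_replace_toList (ws : List String) (s : String) :
    (ws.foldl (fun t w => PySem.Str.replace t w "") s).toList
      = stripWords (ws.map String.toList) s.toList := by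
  induction ws generalizing s with
  | nil => simp [stripWords]
  | cons w ws ih =>
    show (ws.foldl _ (PySem.Str.replace s w "")).toList
      = stripWords (ws.map String.toList) (PySem.Chars.replace s.toList w.toList [])
    rw [ih, PySem.Str.toList_replace]
    rfl

theorem stripAll_toList (s : String) : (stripAll s).toList = stripWords blackChars s.toList := by
  rw [stripAll, foldl_replace_toList, blackB_map]

theorem toList_inj {s t : String} (h : s.toList = t.toList) : s = t := by
  have := congrArg String.ofList h
  simpa using this

def validation_alt (input_string : String) : String :=
  let t := stripAll input_string
  if t = input_string then input_string else validation_alt t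
termination_by input_string.toList.length
decreasing_by
  rename_i h
  rcases stripWords_eq_or_lt blackChars blackChars_ne input_string.toList with heq | hlt
  · exact absurd (toList_inj (by rw [stripAll_toList]; exact heq)) h
  · rw [← stripAll_toList] at hlt
    exact hlt


-- ===== PRECONDITION & SPEC =====
def Spec_validation (input_string : String) (out : String) : Prop := out = validation_alt input_string
instance (input_string : String) (out : String) : Decidable (Spec_validation input_string out) := by unfold Spec_validation; infer_instance

-- ===== CLAIM (what is proved, stated in full; the proofs are below) =====
def Claim_equal_validation : Prop := ∀ (input_string : String), Dom_validation input_string → Spec_validation input_string (validation input_string)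

-- ===== LEMMAS AND PROOFS =====
theorem guard_iff (t : String) :
    (blackListA.map (fun w => PySem.Str.isIn w t)).any id = true ↔ ∃ w ∈ blackChars, w <:+: t.toList := by
  rw [← blackA_map]
  simp [List.any_eq_true, PySem.Chars.isIn_iff_infix]

theorem strip_fix (t : String) (h : ∀ w ∈ blackChars, ¬ w <:+: t.toList) : stripAll t = t :=
  toList_inj (by rw [stripAll_toList]; exact stripWords_of_not_any blackChars blackChars_ne _ h)

theorem pass_eq_strip (s : String) :
    blackListA.foldl (fun s w => if PySem.Str.isIn w s then PySem.Str.replace s w "" else s) s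
      = stripAll s :=
  toList_inj (by rw [passA_toList, blackA_map, stripAll_toList])

set_option maxRecDepth 16384 in
theorem validation_eq_alt (s : String) : validation s = validation_alt s := by
  rw [validation.eq_def, validation_alt.eq_def]
  simp only [pass_eq_strip]
  rcases stripWords_eq_or_lt blackChars blackChars_ne s.toList with heq | hlt
  · -- fixed point: stripAll s = s, no word occurs
    have hfix : stripAll s = s := toList_inj (by rw [stripAll_toList]; exact heq)
    have hnone : ∀ w ∈ blackChars, ¬ w <:+: s.toList := by
      intro w hw hin
      have := stripWords_lt_of_mem blackChars blackChars_ne s.toList ⟨w, hw, hin⟩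
      rw [heq] at this
      exact lt_irrefl _ this
    rw [hfix]
    rw [if_pos rfl]
    rw [dif_neg]
    intro hany
    rcases (guard_iff s).mp hany with ⟨w, hw, hin⟩
    exact hnone w hw hin
  · -- strictly shrinks
    have hlt' : (stripAll s).toList.length < s.toList.length := by
      rw [stripAll_toList]; exact hlt
    have hne : stripAll s ≠ s := by
      intro hx
      rw [← stripAll_toList, hx] at hlt
      exact lt_irrefl _ hlt
    rw [if_neg hne]
    by_cases hany : (blackListA.map (fun w => PySem.Str.isIn w (stripAll s))).any id = true
    · rw [dif_pos hany]
      exact validation_eq_alt (stripAll s)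
    · rw [dif_neg hany]
      have hnone : ∀ w ∈ blackChars, ¬ w <:+: (stripAll s).toList := by
        intro w hw hin
        exact hany ((guard_iff (stripAll s)).mpr ⟨w, hw, hin⟩)
      rw [validation_alt.eq_def, if_pos (strip_fix (stripAll s) hnone)]
termination_by s.toList.length
decreasing_by exact hlt'

-- ===== VERDICT (by name: the statement is the Claim_ definition above) =====
theorem validation_spec : Claim_equal_validation := by
  intro s _
  unfold Spec_validation
  exact validation_eq_alt s
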